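-- pv_equiv track=rewrite | github.com/PeterGati/paraspots | Accesiores/scraper_v4.py | extract_max_rating
-- ===== SOURCE A (Python) =====
-- def extract_max_rating(images, rating_map):
--     max_val = 0
--     for img in images:
--         src = img.get("src", "")
--         for key in rating_map:
--             if key in src:
--                 max_val = max(max_val, rating_map[key])
--     return max_val
-- ===== SOURCE B (Python) =====
-- def extract_max_rating(images, rating_map):
--     srcs = [img.get("src", "") for img in images]
--     for value, key in sorted(((v, k) for k, v in rating_map.items()),
--                              key=lambda t: t[0], reverse=True):
--         if value <= 0:
--             break
--         if any(key in s for s in srcs):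
--             return value
--     return 0
-- ===== Notes on version B (the rewrite author's own statement) =====
-- stated objective: alternative
-- what changed: B sorts the (value, key) pairs by value in descending order once and then scans them with early exit: the first pair whose key occurs in some src is the answer (and the scan stops as soon as values drop to <= 0, since they can never beat the default 0) -- instead of A's exhaustive per-image re-scan of every key keeping a running max.
import Mathlib
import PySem

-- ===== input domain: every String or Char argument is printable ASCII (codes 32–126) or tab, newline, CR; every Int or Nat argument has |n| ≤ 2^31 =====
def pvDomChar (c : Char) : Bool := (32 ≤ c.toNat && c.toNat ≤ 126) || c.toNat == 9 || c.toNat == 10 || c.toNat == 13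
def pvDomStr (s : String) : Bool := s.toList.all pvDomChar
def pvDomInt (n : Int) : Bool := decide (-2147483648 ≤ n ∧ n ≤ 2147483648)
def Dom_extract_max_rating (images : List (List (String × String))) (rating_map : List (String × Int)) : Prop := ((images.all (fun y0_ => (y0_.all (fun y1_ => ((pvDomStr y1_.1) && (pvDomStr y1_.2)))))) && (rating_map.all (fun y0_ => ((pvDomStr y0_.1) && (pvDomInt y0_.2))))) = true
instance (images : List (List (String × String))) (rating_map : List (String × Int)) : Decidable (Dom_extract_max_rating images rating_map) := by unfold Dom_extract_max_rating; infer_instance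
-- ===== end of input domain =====

-- B sorts the (value, key) pairs by value descending and scans with early exit (first
-- matching pair wins; the scan stops once values drop to ≤ 0), instead of A's exhaustive
-- nested scan with a running max (objective: alternative).

-- ===== PORT A =====
def extract_max_rating (images : List (List (String × String))) (rating_map : List (String × Int)) : Int :=
  images.foldl (fun max_val img =>
    let src := PySem.Dict.getD ⟨img⟩ "src" ""                 -- img.get("src", "")
    (PySem.Dict.keys (⟨rating_map⟩ : PySem.Dict String Int)).foldl (fun mv key =>
      if PySem.Str.isIn key src then
        -- rating_map[key]: key comes from the dict itself, so KeyError is impossible; getD is exact here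
        max mv (PySem.Dict.getD ⟨rating_map⟩ key 0)
      else mv) max_val) 0

-- ===== PORT B =====
-- the for-loop with its two exits (break on value ≤ 0, return on a match), as a recursion
def pvScanB (srcs : List String) : List (Int × String) → Int
  | [] => 0
  | (v, k) :: t =>
    if v ≤ 0 then 0
    else if srcs.any (fun s => PySem.Str.isIn k s) then v
    else pvScanB srcs t

def extract_max_rating_alt (images : List (List (String × String))) (rating_map : List (String × Int)) : Int :=
  let srcs := images.map (fun img => PySem.Dict.getD ⟨img⟩ "src" "")
  -- sorted(((v, k) for k, v in rating_map.items()), key=lambda t: t[0], reverse=True)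
  pvScanB srcs (PySem.List.sorted ((PySem.Dict.items (⟨rating_map⟩ : PySem.Dict String Int)).map (fun p => (p.2, p.1))) (fun t => t.1) true)

-- ===== PRECONDITION & SPEC =====
-- Pre_ requires the association lists standing for the Python dicts to have pairwise distinct
-- keys: a duplicate-key list does not arise from any Python dict, and which of the duplicate
-- values counts is an artefact of the list encoding, not a behaviour of A.
def Pre_extract_max_rating (images : List (List (String × String))) (rating_map : List (String × Int)) : Prop :=
  (rating_map.map Prod.fst).Nodup ∧ ∀ img ∈ images, (img.map Prod.fst).Nodup
instance (images : List (List (String × String))) (rating_map : List (String × Int)) : Decidable (Pre_extract_max_rating images rating_map) := by unfold Pre_extract_max_rating; infer_instance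

def pvWitness_extract_max_rating : (List (List (String × String))) × (List (String × Int)) :=
  ([[("src", "x_spot5_y")], [("alt", "spot9")]], [("spot5", 5), ("spot9", 9)])

def Spec_extract_max_rating (images : List (List (String × String))) (rating_map : List (String × Int)) (out : Int) : Prop := out = extract_max_rating_alt images rating_map
instance (images : List (List (String × String))) (rating_map : List (String × Int)) (out : Int) : Decidable (Spec_extract_max_rating images rating_map out) := by unfold Spec_extract_max_rating; infer_instance

-- ===== CLAIM (what is proved, stated in full; the proofs are below) =====
def Claim_equal_extract_max_rating : Prop := ∀ (images : List (List (String × String))) (rating_map : List (String × Int)), Dom_extract_max_rating images rating_map → Pre_extract_max_rating images rating_map → Spec_extract_max_rating images rating_map (extract_max_rating images rating_map)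

-- ===== LEMMAS AND PROOFS =====

theorem pv_foldl_max_nonneg (l : List Int) : 0 ≤ l.foldl max 0 :=
  (PySem.List.le_foldl_max l 0).1

theorem pv_le_foldl_max_of_mem {l : List Int} {x : Int} (h : x ∈ l) : x ≤ l.foldl max 0 :=
  (PySem.List.le_foldl_max l 0).2 x h

theorem pv_foldl_max_subset {l₁ l₂ : List Int} (h : ∀ x, x ∈ l₁ → x ∈ l₂) :
    l₁.foldl max 0 ≤ l₂.foldl max 0 := by
  rcases PySem.List.foldl_max_mem l₁ 0 with h0 | hm
  · rw [h0]; exact pv_foldl_max_nonneg l₂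
  · exact pv_le_foldl_max_of_mem (h _ hm)

theorem pv_foldl_max_ext {l₁ l₂ : List Int} (h : ∀ x, x ∈ l₁ ↔ x ∈ l₂) :
    l₁.foldl max 0 = l₂.foldl max 0 :=
  le_antisymm (pv_foldl_max_subset fun x hx => (h x).1 hx)
    (pv_foldl_max_subset fun x hx => (h x).2 hx)

theorem pv_foldl_max_zero {l : List Int} (h : ∀ x ∈ l, x ≤ 0) : l.foldl max 0 = 0 := by
  rcases PySem.List.foldl_max_mem l 0 with h0 | hm
  · exact h0
  · exact le_antisymm (h _ hm) (pv_foldl_max_nonneg l)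

theorem pv_foldl_max_top {v : Int} {l : List Int} (h0 : 0 ≤ v) (h : ∀ x ∈ l, x ≤ v) :
    (v :: l).foldl max 0 = v := by
  refine le_antisymm ?_ (pv_le_foldl_max_of_mem (List.mem_cons_self))
  rcases PySem.List.foldl_max_mem (v :: l) 0 with hz | hm
  · rw [hz]; exact h0
  · rcases List.mem_cons.1 hm with he | ht
    · rw [he]
    · exact h _ ht

-- A's inner loop over the keys is a running max over the matched looked-up values
theorem pv_inner_eq (rm : List (String × Int)) (src : String) :
    ∀ (K : List String) (a : Int),
      K.foldl (fun mv key => if PySem.Str.isIn key src then max mv (PySem.Dict.getD ⟨rm⟩ key 0) else mv) a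
        = ((K.filter (fun k => PySem.Str.isIn k src)).map
             (fun k => PySem.Dict.getD (⟨rm⟩ : PySem.Dict String Int) k 0)).foldl max a := by
  intro K
  induction K with
  | nil => intro a; rfl
  | cons k t ih =>
    intro a
    cases hk : PySem.Str.isIn k src
    · simp only [List.foldl_cons, List.filter_cons, hk, Bool.false_eq_true, reduceIte]
      exact ih a
    · simp only [List.foldl_cons, List.filter_cons, hk, reduceIte, List.map_cons]
      exact ih _

-- A's outer loop concatenates the per-image matched lists
theorem pv_outer_eq (W : String → List Int) :
    ∀ (srcs : List String) (a : Int),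
      srcs.foldl (fun acc src => (W src).foldl max acc) a = (srcs.flatMap W).foldl max a := by
  intro srcs
  induction srcs with
  | nil => intro a; rfl
  | cons s t ih =>
    intro a
    simp only [List.foldl_cons, List.flatMap_cons, List.foldl_append]
    exact ih _

theorem pv_keys_items (rm : List (String × Int)) :
    PySem.Dict.keys (⟨rm⟩ : PySem.Dict String Int) = rm.map Prod.fst := rfl

-- with distinct keys the dict lookup of a pair's key returns that pair's value
theorem pv_lookup_of_mem {rm : List (String × Int)} (hnd : (rm.map Prod.fst).Nodup)
    {p : String × Int} (hp : p ∈ rm) :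
    PySem.Dict.getD (⟨rm⟩ : PySem.Dict String Int) p.1 0 = p.2 := by
  exact PySem.Dict.getD_of_mem_items (⟨rm⟩ : PySem.Dict String Int) hp hnd 0

-- B's scan of a value-descending list is the running max (with default 0) of the matched values
theorem pv_scan_eq (srcs : List String) :
    ∀ (L : List (Int × String)), L.Pairwise (fun a b => b.1 ≤ a.1) →
      pvScanB srcs L
        = ((L.filter (fun p => srcs.any (fun s => PySem.Str.isIn p.2 s))).map Prod.fst).foldl max 0 := by
  intro L
  induction L with
  | nil => intro _; rfl
  | cons p t ih =>
    intro hpw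
    obtain ⟨hhead, htail⟩ := List.pairwise_cons.1 hpw
    obtain ⟨v, k⟩ := p
    by_cases hv : v ≤ 0
    · -- all values in the list are ≤ 0, so the max over the matched ones is 0
      simp only [pvScanB, hv, if_pos]
      refine (pv_foldl_max_zero ?_).symm
      intro x hx
      rcases List.mem_map.1 hx with ⟨q, hq, rfl⟩
      rcases List.mem_cons.1 (List.mem_of_mem_filter hq) with he | ht
      · rw [he]; exact hv
      · exact le_trans (hhead q ht) hv
    · cases hm : srcs.any (fun s => PySem.Str.isIn k s)
      · simp only [pvScanB, hv, hm, Bool.false_eq_true, if_false, if_neg, not_false_iff,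
          List.filter_cons, reduceIte]
        exact ih htail
      · simp only [pvScanB, hv, hm, if_true, if_neg, not_false_iff, List.filter_cons,
          reduceIte, List.map_cons]
        refine (pv_foldl_max_top (by omega : (0:Int) ≤ v) ?_).symm
        intro x hx
        rcases List.mem_map.1 hx with ⟨q, hq, rfl⟩
        exact hhead q (List.mem_of_mem_filter hq)

-- ===== VERDICT (by name: the statement is the Claim_ definition above) =====
theorem extract_max_rating_spec : Claim_equal_extract_max_rating := by
  intro images rm _hdom hpre
  obtain ⟨hnd, -⟩ := hpre
  unfold Spec_extract_max_rating
  simp only [extract_max_rating, extract_max_rating_alt]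
  -- A's nested folds = max over the flatMap of matched looked-up values
  have hfn : (fun (max_val : Int) (img : List (String × String)) =>
      (PySem.Dict.keys (⟨rm⟩ : PySem.Dict String Int)).foldl (fun mv key =>
        if PySem.Str.isIn key (PySem.Dict.getD ⟨img⟩ "src" "") then
          max mv (PySem.Dict.getD ⟨rm⟩ key 0) else mv) max_val)
      = (fun (a : Int) (img : List (String × String)) =>
          (((rm.map Prod.fst).filter (fun k => PySem.Str.isIn k (PySem.Dict.getD (⟨img⟩ : PySem.Dict String String) "src" ""))).map
            (fun k => PySem.Dict.getD (⟨rm⟩ : PySem.Dict String Int) k 0)).foldl max a) := by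
    funext a img
    rw [pv_keys_items, pv_inner_eq]
  rw [hfn]
  have h2 : images.foldl (fun (a : Int) img =>
        (((rm.map Prod.fst).filter (fun k => PySem.Str.isIn k (PySem.Dict.getD (⟨img⟩ : PySem.Dict String String) "src" ""))).map
          (fun k => PySem.Dict.getD (⟨rm⟩ : PySem.Dict String Int) k 0)).foldl max a) 0
      = ((images.map (fun img => PySem.Dict.getD (⟨img⟩ : PySem.Dict String String) "src" "")).flatMap
          (fun s => ((rm.map Prod.fst).filter (fun k => PySem.Str.isIn k s)).map
            (fun k => PySem.Dict.getD (⟨rm⟩ : PySem.Dict String Int) k 0))).foldl max 0 := by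
    rw [← pv_outer_eq, List.foldl_map]
  rw [h2]
  -- B's scan = max over the matched pairs of the sorted list
  rw [pv_scan_eq _ _ (PySem.List.sorted_pairwise_rev _ _)]
  -- the two max-lists have the same members
  refine pv_foldl_max_ext fun x => ?_
  have hperm : ∀ q : Int × String,
      q ∈ PySem.List.sorted ((PySem.Dict.items (⟨rm⟩ : PySem.Dict String Int)).map (fun p => (p.2, p.1))) (fun t => t.1) true
        ↔ ∃ p ∈ rm, q = (p.2, p.1) := by
    intro q
    rw [PySem.List.mem_sorted]
    have : PySem.Dict.items (⟨rm⟩ : PySem.Dict String Int) = rm := rfl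
    rw [this, List.mem_map]
    constructor
    · rintro ⟨p, hp, rfl⟩; exact ⟨p, hp, rfl⟩
    · rintro ⟨p, hp, rfl⟩; exact ⟨p, hp, rfl⟩
  simp only [List.mem_flatMap, List.mem_map, List.mem_filter]
  constructor
  · rintro ⟨src, hsrc, k, ⟨⟨p, hp, rfl⟩, hkin⟩, rfl⟩
    refine ⟨(p.2, p.1), ⟨(hperm _).2 ⟨p, hp, rfl⟩, ?_⟩, (pv_lookup_of_mem hnd hp).symm⟩
    simp only [List.any_eq_true, List.mem_map]
    exact ⟨src, hsrc, hkin⟩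
  · rintro ⟨q, ⟨hq, hcond⟩, rfl⟩
    rcases (hperm q).1 hq with ⟨p, hp, rfl⟩
    simp only [List.any_eq_true, List.mem_map] at hcond
    rcases hcond with ⟨src, hsrc, hkin⟩
    exact ⟨src, hsrc, p.1, ⟨⟨p, hp, rfl⟩, hkin⟩, pv_lookup_of_mem hnd hp⟩
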